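-- pv_equiv track=rewrite | github.com/joaopedropassostocantins/AFASIA | pictoric_agent.py | find_blobs
-- ===== SOURCE A (Python) =====
-- from collections import defaultdict, deque
--
-- def find_blobs(grid):
--     """Identifica os dois menores grupos de cores não-zero no grid."""
--     colors = defaultdict(list)
--     for r, row in enumerate(grid):
--         for c, val in enumerate(row):
--             v = int(val)
--             if v != 0:
--                 colors[v].append((r, c))
--     if len(colors) < 2:
--         return [], []
--     ranking = sorted(colors.keys(), key=lambda k: len(colors[k]))
--     return colors[ranking[0]], colors[ranking[1]]
-- ===== SOURCE B (Python) =====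
-- def find_blobs(grid):
--     """Identifica os dois menores grupos de cores não-zero no grid."""
--     colors = {}
--     for r, row in enumerate(grid):
--         for c, val in enumerate(row):
--             v = int(val)
--             if v != 0:
--                 colors.setdefault(v, []).append((r, c))
--     if len(colors) < 2:
--         return [], []
--     best1 = None  # (key, size)
--     best2 = None
--     for k, pts in colors.items():
--         n = len(pts)
--         if best1 is None or n < best1[1]:
--             best2 = best1
--             best1 = (k, n)
--         elif best2 is None or n < best2[1]:
--             best2 = (k, n)
--     return colors[best1[0]], colors[best2[0]]
-- ===== Notes on version B (the rewrite author's own statement) =====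
-- stated objective: alternative
-- what changed: The sort of all color groups by size is replaced by a single linear scan over the dict in insertion order that maintains the two smallest groups with strict-< updates (matching the stable sort's tie-breaking); the grouping pass is unchanged.
import Mathlib
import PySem

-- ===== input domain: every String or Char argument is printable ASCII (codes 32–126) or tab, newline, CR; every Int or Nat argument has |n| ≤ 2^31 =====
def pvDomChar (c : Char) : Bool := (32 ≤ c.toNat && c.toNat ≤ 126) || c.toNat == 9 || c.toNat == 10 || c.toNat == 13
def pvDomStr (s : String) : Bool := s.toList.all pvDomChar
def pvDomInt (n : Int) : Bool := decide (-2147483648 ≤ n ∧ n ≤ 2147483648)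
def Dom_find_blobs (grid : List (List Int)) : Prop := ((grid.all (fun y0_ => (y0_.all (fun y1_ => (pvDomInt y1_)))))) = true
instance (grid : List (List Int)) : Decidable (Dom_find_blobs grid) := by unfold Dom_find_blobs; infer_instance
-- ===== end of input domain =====

-- B replaces A's sort of the color groups by a single two-smallest selection scan over the
-- dict in insertion order (strict-< updates reproduce the stable sort's tie-breaking): alternative algorithm, same measured cost.


-- ===== PORT A =====
-- shared first pass: both Pythons build the same dict of coordinates per non-zero color
-- (A via defaultdict(list), B via dict.setdefault — the same insertion-ordered grouping)
def pvColors (grid : List (List Int)) : PySem.Dict Int (List (Int × Int)) :=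
  (PySem.List.enumerate grid).foldl (fun d rrow =>
    (PySem.List.enumerate rrow.2).foldl (fun d cval =>
      if cval.2 ≠ 0 then d.modify cval.2 [] (· ++ [(rrow.1, cval.1)]) else d) d)
    PySem.Dict.empty

def find_blobs (grid : List (List Int)) : (List (Int × Int)) × (List (Int × Int)) :=
  let colors := pvColors grid
  if colors.size < 2 then ([], [])
  else
    let ranking := PySem.List.sorted colors.keys (fun k => PySem.List.len (colors.getD k []))
    (colors.getD (PySem.List.pyGetD ranking 0 0) [], colors.getD (PySem.List.pyGetD ranking 1 0) [])

-- ===== PORT B =====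
def find_blobs_alt (grid : List (List Int)) : (List (Int × Int)) × (List (Int × Int)) :=
  let colors := pvColors grid
  if colors.size < 2 then ([], [])
  else
    let best := colors.items.foldl (fun (b : Option (Int × Int) × Option (Int × Int)) kp =>
      let n : Int := PySem.List.len kp.2
      match b.1 with
      | none => (some (kp.1, n), b.1)
      | some p1 =>
        if n < p1.2 then (some (kp.1, n), b.1)
        else match b.2 with
          | none => (b.1, some (kp.1, n))
          | some p2 => if n < p2.2 then (b.1, some (kp.1, n)) else b)
      (none, none)
    (colors.getD (match best.1 with | some p => p.1 | none => 0) [],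
     colors.getD (match best.2 with | some p => p.1 | none => 0) [])

-- ===== PRECONDITION & SPEC =====
def Spec_find_blobs (grid : List (List Int)) (out : (List (Int × Int)) × (List (Int × Int))) : Prop := out = find_blobs_alt grid
instance (grid : List (List Int)) (out : (List (Int × Int)) × (List (Int × Int))) : Decidable (Spec_find_blobs grid out) := by unfold Spec_find_blobs; infer_instance

-- ===== CLAIM (what is proved, stated in full; the proofs are below) =====
def Claim_equal_find_blobs : Prop := ∀ (grid : List (List Int)), Dom_find_blobs grid → Spec_find_blobs grid (find_blobs grid)

-- ===== LEMMAS AND PROOFS =====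

-- B's two-smallest scan state on a key list under key function kf
def pvScanStep (kf : Int → Int) (b : Option (Int × Int) × Option (Int × Int)) (k : Int) :
    Option (Int × Int) × Option (Int × Int) :=
  let n := kf k
  match b.1 with
  | none => (some (k, n), b.1)
  | some p1 =>
    if n < p1.2 then (some (k, n), b.1)
    else match b.2 with
      | none => (b.1, some (k, n))
      | some p2 => if n < p2.2 then (b.1, some (k, n)) else b

-- the scan state determined by the first two elements of a (sorted) list
def pvStOf (kf : Int → Int) : List Int → Option (Int × Int) × Option (Int × Int)
  | [] => (none, none)
  | [a] => (some (a, kf a), none)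
  | a :: b :: _ => (some (a, kf a), some (b, kf b))

-- one insertion-sort step changes the first two elements exactly as one scan step changes the state
lemma pvStep_insertBy (kf : Int → Int) (x : Int) (acc : List Int) :
    pvScanStep kf (pvStOf kf acc) x
      = pvStOf kf (PySem.List.insertBy (fun a b => decide (kf a < kf b)) x acc) := by
  match acc with
  | [] => simp [pvScanStep, pvStOf, PySem.List.insertBy]
  | [a] =>
    simp only [pvScanStep, pvStOf, PySem.List.insertBy]
    by_cases h : kf x < kf a <;> simp [h]
  | a :: b :: t =>
    simp only [pvScanStep, pvStOf, PySem.List.insertBy]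
    by_cases h1 : kf x < kf a
    · simp [h1]
    · by_cases h2 : kf x < kf b <;> simp [h1, h2]

lemma pvScan_eq_stOf_foldl (kf : Int → Int) (ks : List Int) (acc : List Int) :
    ks.foldl (pvScanStep kf) (pvStOf kf acc)
      = pvStOf kf (ks.foldl (fun a x => PySem.List.insertBy (fun a b => decide (kf a < kf b)) x a) acc) := by
  induction ks generalizing acc with
  | nil => rfl
  | cons x ks ih =>
    simp only [List.foldl_cons, pvStep_insertBy kf x acc]
    exact ih _

lemma pvScan_eq_stOf_sorted (kf : Int → Int) (ks : List Int) :
    ks.foldl (pvScanStep kf) (none, none) = pvStOf kf (PySem.List.sorted ks kf) := by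
  rw [PySem.List.sorted_eq_foldl_insertBy]
  exact pvScan_eq_stOf_foldl kf ks []

lemma pvColors_nodup_keys_aux (rows : List (Int × List Int))
    (d : PySem.Dict Int (List (Int × Int))) (h : d.keys.Nodup) :
    (rows.foldl (fun d rrow =>
      (PySem.List.enumerate rrow.2).foldl (fun d (cval : Int × Int) =>
        if cval.2 ≠ 0 then d.modify cval.2 [] (· ++ [(rrow.1, cval.1)]) else d) d) d).keys.Nodup := by
  induction rows generalizing d with
  | nil => exact h
  | cons r rs ih =>
    simp only [List.foldl_cons]
    apply ih
    rw [PySem.List.foldl_ite_eq_foldl_filter (p := fun cval : Int × Int => cval.2 ≠ 0)]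
    exact PySem.Dict.nodup_keys_foldl_modify_key _ (fun (cval : Int × Int) => cval.2) []
      (fun _ (cval : Int × Int) => (· ++ [(r.1, cval.1)])) d h

lemma pvColors_nodup_keys (grid : List (List Int)) : (pvColors grid).keys.Nodup :=
  pvColors_nodup_keys_aux _ _ (by simp [PySem.Dict.keys, PySem.Dict.empty])

-- ===== VERDICT (by name: the statement is the Claim_ definition above) =====
theorem find_blobs_spec : Claim_equal_find_blobs := by
  intro grid _
  unfold Spec_find_blobs find_blobs find_blobs_alt
  set colors := pvColors grid with hc
  by_cases hs : colors.size < 2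
  · simp [hs]
  · simp only [hs, if_false]
    have hnd : colors.keys.Nodup := pvColors_nodup_keys grid
    set kf : Int → Int := fun k => PySem.List.len (colors.getD k []) with hkf
    -- B's fold over items is the key-scan
    have hitems : colors.items = colors.keys.map (fun k => (k, colors.getD k [])) :=
      PySem.Dict.items_eq_map_keys colors hnd []
    have hfold : colors.items.foldl (fun (b : Option (Int × Int) × Option (Int × Int)) kp =>
        let n : Int := PySem.List.len kp.2
        match b.1 with
        | none => (some (kp.1, n), b.1)
        | some p1 =>
          if n < p1.2 then (some (kp.1, n), b.1)
          else match b.2 with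
            | none => (b.1, some (kp.1, n))
            | some p2 => if n < p2.2 then (b.1, some (kp.1, n)) else b)
        (none, none) = colors.keys.foldl (pvScanStep kf) (none, none) := by
      rw [hitems, List.foldl_map]
      rfl
    rw [hfold, pvScan_eq_stOf_sorted]
    -- the sorted list has at least two elements
    have hlen : 2 ≤ (PySem.List.sorted colors.keys kf).length := by
      rw [PySem.List.length_sorted]
      have : colors.size = colors.keys.length := by
        simp [PySem.Dict.size, PySem.Dict.keys]
      omega
    match hsrt : PySem.List.sorted colors.keys kf, hlen with
    | r0 :: r1 :: rest, _ =>
      simp [pvStOf, PySem.List.pyGetD]
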